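-- pv_equiv track=rewrite | github.com/miliar/Code_Jam_Webscraper | solutions_python/Problem_181/1627.py | GetLowestLastWord
-- ===== SOURCE A (Python) =====
-- def GetLowestLastWord(letters):
--     numLetters = len(letters)
--     lowestLastWord = [letters[0]]
--
--     for i in range(1, numLetters):
--         letter = letters[i]
--         if letter >= lowestLastWord[0]:
--             lowestLastWord.insert(0, letter)
--         else:
--             lowestLastWord.append(letter)
--
--     return lowestLastWord
-- ===== SOURCE B (Python) =====
-- def GetLowestLastWord(letters):
--     # prefix-maximum table: prefix_max[i] = max(letters[0..i])
--     prefix_max = []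
--     m = letters[0]
--     for x in letters:
--         if m < x:
--             m = x
--         prefix_max.append(m)
--     # partition pass: letters[i] goes to front iff it is >= max of the letters before it
--     front = [letters[0]]
--     back = []
--     for letter, pm in zip(letters[1:], prefix_max):
--         if pm <= letter:
--             front.append(letter)
--         else:
--             back.append(letter)
--     return front[::-1] + back
-- ===== Notes on version B (the rewrite author's own statement) =====
-- stated objective: alternative
-- what changed: Replaces A's single loop that prepends/appends into one growing list (with an O(n) insert(0,...) each time) by a prefix-maximum table plus a separate partition pass into front/back lists, returning reversed front plus back.
import Mathlib
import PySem

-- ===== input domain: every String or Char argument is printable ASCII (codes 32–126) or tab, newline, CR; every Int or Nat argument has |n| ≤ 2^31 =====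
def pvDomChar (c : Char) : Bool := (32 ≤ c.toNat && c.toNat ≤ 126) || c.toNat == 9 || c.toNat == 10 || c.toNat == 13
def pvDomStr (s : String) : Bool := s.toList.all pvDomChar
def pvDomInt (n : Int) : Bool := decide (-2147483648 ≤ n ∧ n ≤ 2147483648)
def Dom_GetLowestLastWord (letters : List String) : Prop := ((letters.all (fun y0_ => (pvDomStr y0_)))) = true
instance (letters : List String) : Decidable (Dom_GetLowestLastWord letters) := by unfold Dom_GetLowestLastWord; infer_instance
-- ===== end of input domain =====

-- B replaces A's single prepend/append loop by a prefix-maximum table plus a separate partition pass (alternative decomposition).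


-- ===== PORT A =====
-- loop body of A: prepend when letter >= current front element, else append
def pvStepA (llw : List String) (letter : String) : List String :=
  if PySem.List.pyGetD llw 0 "" ≤ letter then PySem.List.insert llw 0 letter
  else llw ++ [letter]

def GetLowestLastWord (letters : List String) : List String :=
  (PySem.List.pyRange 1 (PySem.List.len letters) 1).foldl
    (fun llw i => pvStepA llw (PySem.List.pyGetD letters i ""))
    [PySem.List.pyGetD letters 0 ""]

-- ===== PORT B =====
-- running-maximum update of B's first loop (state: current max, table so far)
def pvStepPM (st : String × List String) (x : String) : String × List String :=
  let m := if st.1 < x then x else st.1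
  (m, st.2 ++ [m])

-- partition step of B's second loop (state: front, back; input: (letter, prefix max))
def pvStepB (st : List String × List String) (p : String × String) : List String × List String :=
  if p.2 ≤ p.1 then (st.1 ++ [p.1], st.2) else (st.1, st.2 ++ [p.1])

def GetLowestLastWord_alt (letters : List String) : List String :=
  let prefixMax := (letters.foldl pvStepPM (PySem.List.pyGetD letters 0 "", [])).2
  let fb := ((PySem.List.slice letters (some 1) none).zip prefixMax).foldl
      pvStepB ([PySem.List.pyGetD letters 0 ""], [])
  fb.1.reverse ++ fb.2

-- ===== PRECONDITION & SPEC =====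
-- Pre_: A evaluates letters[0], so it raises IndexError exactly on the empty list.
def Pre_GetLowestLastWord (letters : List String) : Prop := letters ≠ []
instance (letters : List String) : Decidable (Pre_GetLowestLastWord letters) := by
  unfold Pre_GetLowestLastWord; infer_instance

def pvWitness_GetLowestLastWord : List String := ["b", "a", "c"]

def Spec_GetLowestLastWord (letters : List String) (out : List String) : Prop :=
  out = GetLowestLastWord_alt letters
instance (letters : List String) (out : List String) : Decidable (Spec_GetLowestLastWord letters out) := by
  unfold Spec_GetLowestLastWord; infer_instance

-- ===== CLAIM (what is proved, stated in full; the proofs are below) =====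
def Claim_equal_GetLowestLastWord : Prop := ∀ (letters : List String), Dom_GetLowestLastWord letters → Pre_GetLowestLastWord letters → Spec_GetLowestLastWord letters (GetLowestLastWord letters)

-- ===== LEMMAS AND PROOFS =====

-- reference prefix-max scan: pvPM m ys = running maxima of ys seeded with m
def pvPM (m : String) : List String → List String
  | [] => []
  | y :: ys => let m' := if m < y then y else m; m' :: pvPM m' ys

-- B's first loop computes the scan
lemma pm_fold (ys : List String) : ∀ (m : String) (acc : List String),
    (ys.foldl pvStepPM (m, acc)).2 = acc ++ pvPM m ys := by
  induction ys with
  | nil => simp [pvPM]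
  | cons y ys ih =>
    intro m acc
    simp only [List.foldl_cons, pvStepPM, pvPM, ih]
    simp

-- core: A's fold over the tail equals B's partition fold over (tail zip prefix-maxima)
lemma core (ys : List String) : ∀ (m : String) (front back : List String),
    front.getLast? = some m →
    ys.foldl pvStepA (front.reverse ++ back)
      = (((ys.zip (m :: pvPM m ys)).foldl pvStepB (front, back)).1.reverse
          ++ ((ys.zip (m :: pvPM m ys)).foldl pvStepB (front, back)).2) := by
  induction ys with
  | nil => intro m front back _; simp
  | cons y ys ih =>
    intro m front back hm
    have hfront : front ≠ [] := by
      rintro rfl; simp at hm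
    have hhead : PySem.List.pyGetD (front.reverse ++ back) 0 "" = m := by
      rw [PySem.List.pyGetD_zero]
      rw [← List.head?_reverse] at hm
      have hrev : front.reverse ≠ [] := by simpa using hfront
      rcases List.exists_cons_of_ne_nil hrev with ⟨h0, t0, he⟩
      rw [he] at hm ⊢
      simp at hm
      simp [hm]
    simp only [pvPM, List.zip_cons_cons, List.foldl_cons, pvStepA, pvStepB, hhead]
    by_cases hle : m ≤ y
    · simp only [if_pos hle]
      have hnew : (if m < y then y else m) = y := by
        by_cases hlt : m < y
        · simp [hlt]
        · simp [hlt]; exact le_antisymm hle (not_lt.mp hlt)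
      rw [PySem.List.insert_zero, hnew]
      have : y :: (front.reverse ++ back) = (front ++ [y]).reverse ++ back := by simp
      rw [this]
      exact ih y (front ++ [y]) back (by simp)
    · simp only [if_neg hle]
      have hnew : (if m < y then y else m) = m := by
        have : ¬ m < y := fun h => hle h.le
        simp [this]
      rw [hnew, List.append_assoc]
      exact ih m front (back ++ [y]) hm

-- ===== VERDICT (by name: the statement is the Claim_ definition above) =====
theorem GetLowestLastWord_spec : Claim_equal_GetLowestLastWord := by
  intro letters _ hpre
  rcases List.exists_cons_of_ne_nil hpre with ⟨x, rest, rfl⟩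
  show GetLowestLastWord (x :: rest) = GetLowestLastWord_alt (x :: rest)
  unfold GetLowestLastWord GetLowestLastWord_alt
  -- A: turn the index loop into a fold over the tail
  rw [PySem.List.foldl_pyRange_pyGetD (x :: rest) "" pvStepA
        [PySem.List.pyGetD (x :: rest) 0 ""] (by norm_num)]
  -- B: compute the prefix-max table and the slice
  have hpm : ((x :: rest).foldl pvStepPM (PySem.List.pyGetD (x :: rest) 0 "", [])).2
      = x :: pvPM x rest := by
    simp only [PySem.List.pyGetD_zero_cons, List.foldl_cons, pvStepPM]
    rw [pm_fold]
    simp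
  rw [hpm, PySem.List.slice_from_one]
  simp only [List.tail_cons, PySem.List.pyGetD_zero_cons]
  have := core rest x [x] [] (by simp)
  simpa using this
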